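-- pv_equiv track=rewrite | github.com/yunaimatsu/glassblock-cli | orgai/main.py | _summary_from_events
-- ===== SOURCE A (Python) =====
-- from typing import Any
--
-- def _summary_from_events(events: list[dict[str, Any]]) -> str:
--     decisions = [event['text'] for event in events if event['type'] == 'decision']
--     tasks = [event['text'] for event in events if event['type'] == 'task']
--     notes = [event['text'] for event in events if event['type'] == 'note']
--     parking = [event['text'] for event in events if event['type'] == 'parking']
--
--     current = notes[-1] if notes else 'No discussion notes captured yet.'
--     decision_line = '; '.join(decisions[-3:]) if decisions else 'No final decisions yet.'
--     open_issues = '; '.join(parking[-3:]) if parking else 'No parked issues.'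
--     next_actions = '; '.join(tasks[-3:]) if tasks else 'No tasks captured.'
--
--     return (
--         f"Current discussion: {current}\n"
--         f"Key decisions: {decision_line}\n"
--         f"Open issues: {open_issues}\n"
--         f"Next actions: {next_actions}"
--     )
-- ===== SOURCE B (Python) =====
-- def _summary_from_events(events):
--     # Single reverse pass keeping only what the summary needs: the last note
--     # and the last three decisions/tasks/parking items (O(1) extra space).
--     last_note = None
--     decisions = []
--     tasks = []
--     parking = []
--     for event in reversed(events):
--         t = event['type']
--         if t == 'note':
--             if last_note is None:
--                 last_note = event['text']
--         elif t == 'decision':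
--             if len(decisions) < 3:
--                 decisions.insert(0, event['text'])
--         elif t == 'task':
--             if len(tasks) < 3:
--                 tasks.insert(0, event['text'])
--         elif t == 'parking':
--             if len(parking) < 3:
--                 parking.insert(0, event['text'])
--
--     current = last_note if last_note is not None else 'No discussion notes captured yet.'
--     decision_line = '; '.join(decisions) if decisions else 'No final decisions yet.'
--     open_issues = '; '.join(parking) if parking else 'No parked issues.'
--     next_actions = '; '.join(tasks) if tasks else 'No tasks captured.'
--
--     return (
--         f"Current discussion: {current}\n"
--         f"Key decisions: {decision_line}\n"
--         f"Open issues: {open_issues}\n"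
--         f"Next actions: {next_actions}"
--     )
-- ===== Notes on version B (the rewrite author's own statement) =====
-- stated objective: alternative
-- what changed: Instead of A's four full filter passes that build complete per-type lists and then slice the last three, B makes one pass over reversed(events) and keeps only what the summary needs: the last note and bounded buckets of at most three decisions/tasks/parking items (O(1) extra space).
import Mathlib
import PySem

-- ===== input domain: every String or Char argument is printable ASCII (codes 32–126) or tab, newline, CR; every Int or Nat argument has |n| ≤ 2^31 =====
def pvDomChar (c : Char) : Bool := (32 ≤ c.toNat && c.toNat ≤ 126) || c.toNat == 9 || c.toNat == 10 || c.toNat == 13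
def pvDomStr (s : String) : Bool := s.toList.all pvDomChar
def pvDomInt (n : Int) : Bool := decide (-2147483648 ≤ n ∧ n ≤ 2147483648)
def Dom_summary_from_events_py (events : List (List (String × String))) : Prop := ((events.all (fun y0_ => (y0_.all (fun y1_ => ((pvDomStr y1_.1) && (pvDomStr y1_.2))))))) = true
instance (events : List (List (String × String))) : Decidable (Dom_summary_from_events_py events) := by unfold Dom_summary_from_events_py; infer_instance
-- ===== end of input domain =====

-- B replaces A's four full filter passes (which build complete per-type lists and slice the last
-- three) with a single pass over reversed(events) that keeps only the last note and bounded
-- buckets of at most three decisions/tasks/parking items.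

-- shared dict-lookup helper (first match; the "" default is never reached under Pre_)
def pvGetK (e : List (String × String)) (k : String) : String :=
  ((e.find? (fun p => p.1 == k)).map (·.2)).getD ""

-- ===== PORT A =====
def summary_from_events_py (events : List (List (String × String))) : String :=
  let decisions := (events.filter (fun e => pvGetK e "type" == "decision")).map (fun e => pvGetK e "text")
  let tasks := (events.filter (fun e => pvGetK e "type" == "task")).map (fun e => pvGetK e "text")
  let notes := (events.filter (fun e => pvGetK e "type" == "note")).map (fun e => pvGetK e "text")
  let parking := (events.filter (fun e => pvGetK e "type" == "parking")).map (fun e => pvGetK e "text")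
  let current := if notes.isEmpty then "No discussion notes captured yet."
                 else (PySem.List.pyGet? notes (-1)).getD ""
  let decision_line := if decisions.isEmpty then "No final decisions yet."
                       else PySem.Str.join "; " (PySem.List.slice decisions (some (-3)) none)
  let open_issues := if parking.isEmpty then "No parked issues."
                     else PySem.Str.join "; " (PySem.List.slice parking (some (-3)) none)
  let next_actions := if tasks.isEmpty then "No tasks captured."
                      else PySem.Str.join "; " (PySem.List.slice tasks (some (-3)) none)
  "Current discussion: " ++ current ++ "\nKey decisions: " ++ decision_line ++
    "\nOpen issues: " ++ open_issues ++ "\nNext actions: " ++ next_actions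

-- ===== PORT B =====
-- loop body of Source B: state = (last_note, decisions, tasks, parking), events visited newest-first
def pvStepR (acc : Option String × List String × List String × List String)
    (e : List (String × String)) : Option String × List String × List String × List String :=
  let t := pvGetK e "type"
  if t == "note" then
    (if acc.1.isSome then acc.1 else some (pvGetK e "text"), acc.2.1, acc.2.2.1, acc.2.2.2)
  else if t == "decision" then
    (acc.1, if acc.2.1.length < 3 then pvGetK e "text" :: acc.2.1 else acc.2.1, acc.2.2.1, acc.2.2.2)
  else if t == "task" then
    (acc.1, acc.2.1, if acc.2.2.1.length < 3 then pvGetK e "text" :: acc.2.2.1 else acc.2.2.1, acc.2.2.2)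
  else if t == "parking" then
    (acc.1, acc.2.1, acc.2.2.1, if acc.2.2.2.length < 3 then pvGetK e "text" :: acc.2.2.2 else acc.2.2.2)
  else acc

def summary_from_events_py_alt (events : List (List (String × String))) : String :=
  let s := events.reverse.foldl pvStepR (none, [], [], [])
  let current := match s.1 with
                 | some n => n
                 | none => "No discussion notes captured yet."
  let decision_line := if s.2.1.isEmpty then "No final decisions yet."
                       else PySem.Str.join "; " s.2.1
  let open_issues := if s.2.2.2.isEmpty then "No parked issues."
                     else PySem.Str.join "; " s.2.2.2
  let next_actions := if s.2.2.1.isEmpty then "No tasks captured."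
                      else PySem.Str.join "; " s.2.2.1
  "Current discussion: " ++ current ++ "\nKey decisions: " ++ decision_line ++
    "\nOpen issues: " ++ open_issues ++ "\nNext actions: " ++ next_actions

-- ===== PRECONDITION & SPEC =====
-- Pre_ excludes exactly the inputs where the Python A raises KeyError: some event lacks a 'type'
-- key, or an event of one of the four tracked types lacks a 'text' key.
def Pre_summary_from_events_py (events : List (List (String × String))) : Prop :=
  ∀ e ∈ events, (e.find? (fun p => p.1 == "type")).isSome = true ∧
    (pvGetK e "type" ∈ (["decision", "task", "note", "parking"] : List String) →
      (e.find? (fun p => p.1 == "text")).isSome = true)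
instance (events : List (List (String × String))) : Decidable (Pre_summary_from_events_py events) := by
  unfold Pre_summary_from_events_py; infer_instance

def pvWitness_summary_from_events_py : (List (List (String × String))) :=
  [[("type", "note"), ("text", "hi")], [("type", "misc")]]

def Spec_summary_from_events_py (events : List (List (String × String))) (out : String) : Prop := out = summary_from_events_py_alt events
instance (events : List (List (String × String))) (out : String) : Decidable (Spec_summary_from_events_py events out) := by unfold Spec_summary_from_events_py; infer_instance

-- ===== CLAIM (what is proved, stated in full; the proofs are below) =====
def Claim_equal_summary_from_events_py : Prop := ∀ (events : List (List (String × String))), Dom_summary_from_events_py events → Pre_summary_from_events_py events → Spec_summary_from_events_py events (summary_from_events_py events)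

-- ===== LEMMAS AND PROOFS =====

-- the three independent component steps of pvStepR
def pvStepNote (a : Option String) (e : List (String × String)) : Option String :=
  if pvGetK e "type" == "note" then (if a.isSome then a else some (pvGetK e "text")) else a

def pvStepBucket (k : String) (a : List String) (e : List (String × String)) : List String :=
  if pvGetK e "type" == k then (if a.length < 3 then pvGetK e "text" :: a else a) else a

lemma pvStepR_eq (a : Option String × List String × List String × List String)
    (e : List (String × String)) :
    pvStepR a e = (pvStepNote a.1 e, pvStepBucket "decision" a.2.1 e,
      pvStepBucket "task" a.2.2.1 e, pvStepBucket "parking" a.2.2.2 e) := by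
  unfold pvStepR pvStepNote pvStepBucket
  by_cases h1 : pvGetK e "type" = "note" <;>
    by_cases h2 : pvGetK e "type" = "decision" <;>
      by_cases h3 : pvGetK e "type" = "task" <;>
        by_cases h4 : pvGetK e "type" = "parking" <;>
          simp_all

-- the fold decomposes componentwise
lemma pvFold_decomp (xs : List (List (String × String)))
    (n : Option String) (d t p : List String) :
    xs.foldl pvStepR (n, d, t, p) =
      (xs.foldl pvStepNote n, xs.foldl (pvStepBucket "decision") d,
       xs.foldl (pvStepBucket "task") t, xs.foldl (pvStepBucket "parking") p) := by
  induction xs generalizing n d t p with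
  | nil => rfl
  | cons e es ih => simp [pvStepR_eq, ih]

-- folding the "first some wins" step over ys.reverse yields the last element
lemma pvFoldLast (ys : List String) (a : Option String) :
    ys.reverse.foldl (fun a x => if a.isSome then a else some x) a =
      (if a.isSome then a else ys.getLast?) := by
  induction ys generalizing a with
  | nil => cases a <;> simp
  | cons y t ih =>
    rw [List.reverse_cons, List.foldl_append]
    cases a with
    | some v => simp [ih]
    | none =>
      simp only [ih]
      cases h : t.getLast? with
      | some w => simp [List.getLast?_cons, h]
      | none =>
        have : t = [] := List.getLast?_eq_none_iff.mp h
        simp [this]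

-- folding the "keep at most three, newest-first prepend" step over ys.reverse yields
-- the last min(3 - a.length) elements of ys followed by a
lemma pvFoldTake3 (ys : List String) (a : List String) (ha : a.length ≤ 3) :
    ys.reverse.foldl (fun a x => if a.length < 3 then x :: a else a) a =
      ys.drop (ys.length - (3 - a.length)) ++ a := by
  induction ys generalizing a with
  | nil => simp
  | cons y t ih =>
    rw [List.reverse_cons, List.foldl_append]
    simp only [List.foldl_cons, List.foldl_nil, ih a ha]
    have hlen : (t.drop (t.length - (3 - a.length)) ++ a).length
        = min t.length (3 - a.length) + a.length := by
      simp [List.length_drop]; omega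
    by_cases hc : t.length < 3 - a.length
    · have h1 : t.length - (3 - a.length) = 0 := by omega
      have h2 : (t.drop (t.length - (3 - a.length)) ++ a).length < 3 := by
        rw [hlen]; omega
      have h3 : t.length + 1 - (3 - a.length) = 0 := by omega
      simp [h1, h3]
      omega
    · have h2 : ¬ (t.drop (t.length - (3 - a.length)) ++ a).length < 3 := by
        rw [hlen]; omega
      have h3 : t.length + 1 - (3 - a.length) = (t.length - (3 - a.length)) + 1 := by omega
      simp only [h2, List.length_cons, h3, List.drop_succ_cons]
      simp

-- unguarded fold over the filtered-mapped list equals the guarded fold over the raw events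
lemma pvBucket_eq (xs : List (List (String × String))) (k : String) (a : List String) :
    xs.foldl (pvStepBucket k) a =
      (((xs.filter (fun e => pvGetK e "type" == k)).map (fun e => pvGetK e "text")).foldl
        (fun a x => if a.length < 3 then x :: a else a) a) := by
  rw [List.foldl_map, ← PySem.List.foldl_if_eq_foldl_filter]
  rfl

lemma pvNote_eq (xs : List (List (String × String))) (a : Option String) :
    xs.foldl pvStepNote a =
      (((xs.filter (fun e => pvGetK e "type" == "note")).map (fun e => pvGetK e "text")).foldl
        (fun a x => if a.isSome then a else some x) a) := by
  rw [List.foldl_map, ← PySem.List.foldl_if_eq_foldl_filter]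
  rfl

-- reverse commutes with filter-map
lemma pvRevFM (xs : List (List (String × String))) (P : List (String × String) → Bool) :
    (xs.reverse.filter P).map (fun e => pvGetK e "text") =
      ((xs.filter P).map (fun e => pvGetK e "text")).reverse := by
  simp [List.filter_reverse]

-- B's bucket for key k equals A's "last three" slice of the full list
lemma pvBucket_final (xs : List (List (String × String))) (k : String) :
    xs.reverse.foldl (pvStepBucket k) [] =
      (let ys := (xs.filter (fun e => pvGetK e "type" == k)).map (fun e => pvGetK e "text")
       ys.drop (ys.length - 3)) := by
  rw [pvBucket_eq, pvRevFM]
  rw [pvFoldTake3 _ [] (by simp)]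
  simp

-- B's last-note accumulator equals the last element of A's notes list
lemma pvNote_final (xs : List (List (String × String))) :
    xs.reverse.foldl pvStepNote none =
      ((xs.filter (fun e => pvGetK e "type" == "note")).map (fun e => pvGetK e "text")).getLast? := by
  rw [pvNote_eq, pvRevFM, pvFoldLast]
  simp

-- ===== VERDICT (by name: the statement is the Claim_ definition above) =====
theorem summary_from_events_py_spec : Claim_equal_summary_from_events_py := by
  intro events _ _
  unfold Spec_summary_from_events_py summary_from_events_py summary_from_events_py_alt
  rw [pvFold_decomp, pvBucket_final, pvBucket_final, pvBucket_final, pvNote_final]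
  set dec := (events.filter (fun e => pvGetK e "type" == "decision")).map (fun e => pvGetK e "text") with hdec
  set tsk := (events.filter (fun e => pvGetK e "type" == "task")).map (fun e => pvGetK e "text") with htsk
  set nts := (events.filter (fun e => pvGetK e "type" == "note")).map (fun e => pvGetK e "text") with hnts
  set prk := (events.filter (fun e => pvGetK e "type" == "parking")).map (fun e => pvGetK e "text") with hprk
  have hslice : ∀ ys : List String,
      PySem.List.slice ys (some (-3)) none = ys.drop (ys.length - 3) := by
    intro ys
    exact PySem.List.slice_from_neg_ofNat ys 3 (by omega)
  have hempty : ∀ ys : List String, (ys.drop (ys.length - 3)).isEmpty = ys.isEmpty := by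
    intro ys
    rcases ys with _ | ⟨y, t⟩
    · simp
    · simp [List.drop_eq_nil_iff]
  have hlast : ∀ ys : List String,
      (match ys.getLast? with
       | some n => n
       | none => "No discussion notes captured yet.") =
      (if ys.isEmpty then "No discussion notes captured yet."
       else (PySem.List.pyGet? ys (-1)).getD "") := by
    intro ys
    rcases h : ys.getLast? with _ | v
    · simp [List.getLast?_eq_none_iff.mp h]
    · have hne : ys ≠ [] := by
        intro he; subst he; simp at h
      simp [hne, PySem.List.pyGet?_neg_one, h, List.isEmpty_iff]
  simp only [hslice, hempty, hlast]
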